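-- pv_equiv track=rewrite | github.com/NicolasPiron/crossmodal-sequences | random_distant_sequences.py | calculate_pairwise_differences
-- ===== SOURCE A (Python) =====
-- def calculate_pairwise_differences(seq_structures):
--     keys = list(seq_structures.keys())
--     n = len(keys)
--     differences = {key: 0 for key in keys}
--     for i in range(n):
--         for j in range(i + 1, n):
--             diff = sum(1 for x, y in zip(seq_structures[keys[i]], seq_structures[keys[j]]) if x != y)
--             differences[keys[i]] += diff
--             differences[keys[j]] += diff
--     return differences
-- ===== SOURCE B (Python) =====
-- def calculate_pairwise_differences(seq_structures):
--     # One pass of per-position value counting instead of the O(n^2) pairwise loop: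
--     # a key's total distance is, summed over its positions p, the number of other
--     # sequences that are long enough at p minus those sharing its value at p
--     # (the sequence itself cancels out of the subtraction).
--     cells = [(p, x) for seq in seq_structures.values() for p, x in enumerate(seq)]
--     counts = {}
--     for c in cells:
--         counts[c] = counts.get(c, 0) + 1
--     sizes = {}
--     for p, _ in cells:
--         sizes[p] = sizes.get(p, 0) + 1
--     return {key: sum(sizes[p] - counts[(p, x)] for p, x in enumerate(seq))
--             for key, seq in seq_structures.items()}
-- ===== Notes on version B (the rewrite author's own statement) =====
-- stated objective: faster
-- what changed: Replaces the O(n^2) pairwise double loop by one pass of per-position value counting: each key's total is the sum over its positions of (number of sequences long enough at that position minus those sharing its value there), the sequence itself cancelling out of the subtraction.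
import Mathlib
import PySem

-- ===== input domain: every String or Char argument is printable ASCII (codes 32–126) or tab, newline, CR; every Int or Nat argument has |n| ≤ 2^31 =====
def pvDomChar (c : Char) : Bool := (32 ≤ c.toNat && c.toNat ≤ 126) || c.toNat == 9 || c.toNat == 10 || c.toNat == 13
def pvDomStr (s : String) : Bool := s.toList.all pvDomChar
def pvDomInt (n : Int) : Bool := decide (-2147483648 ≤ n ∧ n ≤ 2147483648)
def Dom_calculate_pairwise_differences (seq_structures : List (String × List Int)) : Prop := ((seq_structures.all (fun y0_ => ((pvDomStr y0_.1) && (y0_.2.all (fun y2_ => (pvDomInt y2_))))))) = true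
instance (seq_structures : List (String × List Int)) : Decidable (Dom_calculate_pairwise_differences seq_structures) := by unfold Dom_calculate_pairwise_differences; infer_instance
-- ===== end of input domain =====

-- B replaces A's O(n^2) pairwise double loop by one pass of per-position value counting (asymptotically faster).

-- ===== PORT A =====
-- sum(1 for x, y in zip(a, b) if x != y)
def pvDiff (a b : List Int) : Int :=
  (a.zip b).foldl (fun s p => if p.1 ≠ p.2 then s + 1 else s) 0

def calculate_pairwise_differences (seq_structures : List (String × List Int)) : List (String × Int) :=
  let d : PySem.Dict String (List Int) := PySem.Dict.mk seq_structures
  let keys := d.keys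
  let n : Int := (keys.length : Int)
  let differences : PySem.Dict String Int := keys.foldl (fun acc k => acc.insert k 0) PySem.Dict.empty
  let final := (PySem.List.pyRange 0 n 1).foldl (fun ds i =>
      (PySem.List.pyRange (i + 1) n 1).foldl (fun ds j =>
        -- keys[i] / keys[j]: i, j always in range, so pyGetD is exact here;
        -- seq_structures[keys[i]]: the key is always present, so getD is exact here
        let ki := PySem.List.pyGetD keys i ""
        let kj := PySem.List.pyGetD keys j ""
        let diff := pvDiff (d.getD ki []) (d.getD kj [])
        let ds := ds.insert ki (ds.getD ki 0 + diff)
        ds.insert kj (ds.getD kj 0 + diff)) ds) differences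
  final.items

-- ===== PORT B =====
def calculate_pairwise_differences_alt (seq_structures : List (String × List Int)) : List (String × Int) :=
  let cells : List (Int × Int) := seq_structures.flatMap (fun kv => PySem.List.enumerate kv.2 0)
  let counts : PySem.Dict (Int × Int) Int :=
    cells.foldl (fun d c => d.insert c (d.getD c 0 + 1)) PySem.Dict.empty
  let sizes : PySem.Dict Int Int :=
    cells.foldl (fun d c => d.insert c.1 (d.getD c.1 0 + 1)) PySem.Dict.empty
  seq_structures.map (fun kv =>
    (kv.1, ((PySem.List.enumerate kv.2 0).map (fun c => sizes.getD c.1 0 - counts.getD c 0)).sum))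

-- ===== PRECONDITION & SPEC =====
-- Pre_ excludes association lists with duplicate keys: the Python argument is a dict, so an
-- assoc list with duplicate keys does not represent any actual input of A.
def Pre_calculate_pairwise_differences (seq_structures : List (String × List Int)) : Prop :=
  (seq_structures.map Prod.fst).Nodup

instance (seq_structures : List (String × List Int)) : Decidable (Pre_calculate_pairwise_differences seq_structures) := by
  unfold Pre_calculate_pairwise_differences; infer_instance

def pvWitness_calculate_pairwise_differences : (List (String × List Int)) :=
  [("a", [1, 2]), ("b", [1, 3]), ("c", [2])]

def Spec_calculate_pairwise_differences (seq_structures : List (String × List Int)) (out : List (String × Int)) : Prop := out = calculate_pairwise_differences_alt seq_structures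
instance (seq_structures : List (String × List Int)) (out : List (String × Int)) : Decidable (Spec_calculate_pairwise_differences seq_structures out) := by unfold Spec_calculate_pairwise_differences; infer_instance

-- ===== CLAIM (what is proved, stated in full; the proofs are below) =====
def Claim_equal_calculate_pairwise_differences : Prop := ∀ (seq_structures : List (String × List Int)), Dom_calculate_pairwise_differences seq_structures → Pre_calculate_pairwise_differences seq_structures → Spec_calculate_pairwise_differences seq_structures (calculate_pairwise_differences seq_structures)

-- ===== LEMMAS AND PROOFS =====

-- truncated Hamming distance, the common shape both value computations are reduced to
def pvS (a b : List Int) : Int :=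
  ∑ p ∈ Finset.range a.length, if p < b.length ∧ a.getD p 0 ≠ b.getD p 0 then 1 else 0

-- the common value both ports compute at entry t
def pvVal (seq : List (String × List Int)) (t : Nat) : Int :=
  ∑ j ∈ Finset.range seq.length, pvS (seq.getD t ("", [])).2 (seq.getD j ("", [])).2

-- the weight A adds for the pair (i, j)
def pvW (seq : List (String × List Int)) (i j : Int) : Int :=
  pvDiff ((PySem.Dict.mk seq).getD (PySem.List.pyGetD (seq.map Prod.fst) i "") [])
    ((PySem.Dict.mk seq).getD (PySem.List.pyGetD (seq.map Prod.fst) j "") [])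

lemma pv_sum_map_eq_sum_range {α β : Type} [AddCommMonoid β] (l : List α) (f : α → β) (d : α) :
    (l.map f).sum = ∑ i ∈ Finset.range l.length, f (l.getD i d) := by
  induction l with
  | nil => simp
  | cons x xs ih =>
      simp only [List.map_cons, List.sum_cons, List.length_cons, ih,
        Finset.sum_range_succ' (fun i => f ((x :: xs).getD i d))]
      simp [add_comm]

lemma pv_sum_map_range (m : Nat) (g : Nat → Int) :
    ((List.range m).map g).sum = ∑ k ∈ Finset.range m, g k := by
  induction m with
  | zero => simp
  | succ m ih => simp [List.range_succ, Finset.sum_range_succ, ih]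

lemma pv_sum_map_pyRange (a b : Int) (f : Int → Int) :
    ((PySem.List.pyRange a b 1).map f).sum
      = ∑ k ∈ Finset.range (b - a).toNat, f (a + k) := by
  rw [PySem.List.pyRange_one, List.map_map]
  exact pv_sum_map_range _ _

lemma pv_sum_shift (n m : Nat) (f : Nat → Int) :
    ∑ k ∈ Finset.range (n - (m + 1)), f (m + 1 + k)
      = ∑ j ∈ Finset.range n, if m < j then f j else 0 := by
  rw [← Finset.sum_Ico_eq_sum_range]
  have h : Finset.Ico (m + 1) n = (Finset.range n).filter (fun j => m < j) := by
    ext j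
    simp only [Finset.mem_Ico, Finset.mem_filter, Finset.mem_range]
    omega
  rw [h, Finset.sum_filter]

lemma pv_sum_map_pyRange_zero (n : Nat) (f : Int → Int) :
    ((PySem.List.pyRange 0 (n : Int) 1).map f).sum = ∑ k ∈ Finset.range n, f (k : Nat) := by
  rw [pv_sum_map_pyRange]
  have h : ((n : Int) - 0).toNat = n := by omega
  rw [h]
  apply Finset.sum_congr rfl
  intro k _
  rw [zero_add]

lemma pv_sum_map_pyRange_succ (n i : Nat) (f : Int → Int) :
    ((PySem.List.pyRange ((i : Int) + 1) (n : Int) 1).map f).sum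
      = ∑ j ∈ Finset.range n, if i < j then f (j : Nat) else 0 := by
  rw [pv_sum_map_pyRange]
  have h1 : ((n : Int) - ((i : Int) + 1)).toNat = n - (i + 1) := by omega
  rw [h1, ← pv_sum_shift n i]
  apply Finset.sum_congr rfl
  intro k _
  have hc : (i : Int) + 1 + (k : Int) = ((i + 1 + k : Nat) : Int) := by push_cast; ring
  rw [hc]

lemma pv_map_eq_range_map {α β : Type} (l : List α) (f : α → β) (d : α) :
    l.map f = (List.range l.length).map (fun t => f (l.getD t d)) := by
  apply List.ext_getElem
  · simp
  · intro t h1 h2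
    simp only [List.getElem_map, List.getElem_range]
    rw [List.getD_eq_getElem]

lemma pvS_eq_min (a b : List Int) :
    pvS a b = ∑ p ∈ Finset.range (min a.length b.length),
      (if a.getD p 0 ≠ b.getD p 0 then (1 : Int) else 0) := by
  unfold pvS
  have hsub : Finset.range (min a.length b.length) ⊆ Finset.range a.length := by
    intro x hx
    simp only [Finset.mem_range] at hx ⊢
    omega
  have hv : ∀ p ∈ Finset.range a.length, p ∉ Finset.range (min a.length b.length) →
      (if p < b.length ∧ a.getD p 0 ≠ b.getD p 0 then (1 : Int) else 0) = 0 := by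
    intro p hp hnp
    simp only [Finset.mem_range] at hp
    simp only [Finset.mem_range, lt_min_iff, not_and_or, not_lt] at hnp
    have : ¬ p < b.length := by omega
    simp [this]
  rw [← Finset.sum_subset hsub hv]
  apply Finset.sum_congr rfl
  intro p hp
  simp only [Finset.mem_range, lt_min_iff] at hp
  simp [hp.2]

lemma pvS_comm (a b : List Int) : pvS a b = pvS b a := by
  rw [pvS_eq_min, pvS_eq_min, Nat.min_comm]
  exact Finset.sum_congr rfl (fun p _ => by
    congr 1
    simp only [eq_iff_iff, ne_eq]
    tauto)

lemma pvS_self (a : List Int) : pvS a a = 0 := by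
  unfold pvS; simp

lemma pvDiff_eq_pvS (a b : List Int) : pvDiff a b = pvS a b := by
  have hfold : ∀ (l : List (Int × Int)) (s : Int),
      l.foldl (fun s p => if p.1 ≠ p.2 then s + 1 else s) s
        = s + (l.map (fun p => if p.1 ≠ p.2 then (1 : Int) else 0)).sum := by
    intro l
    induction l with
    | nil => simp
    | cons x xs ih =>
        intro s
        simp only [List.foldl_cons, List.map_cons, List.sum_cons, ih]
        split <;> ring
  unfold pvDiff
  rw [hfold, pv_sum_map_eq_sum_range _ _ (0, 0), pvS_eq_min]
  simp only [zero_add, List.length_zip]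
  apply Finset.sum_congr rfl
  intro p hp
  simp only [Finset.mem_range, lt_min_iff] at hp
  have hpz : p < (a.zip b).length := by
    simp only [List.length_zip, lt_min_iff]
    omega
  rw [List.getD_eq_getElem _ _ hpz, List.getElem_zip,
    List.getD_eq_getElem _ _ (by omega : p < a.length),
    List.getD_eq_getElem _ _ (by omega : p < b.length)]

lemma pv_bump_getD (d : PySem.Dict String Int) (key k : String) (w : Int) :
    (d.insert key (d.getD key 0 + w)).getD k 0
      = d.getD k 0 + if k = key then w else 0 := by
  rw [PySem.Dict.getD_insert]
  split <;> simp_all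

lemma pv_bump_keys (d : PySem.Dict String Int) (key : String) (v : Int)
    (h : key ∈ d.keys) : (d.insert key v).keys = d.keys :=
  PySem.Dict.keys_insert_of_contains _ _ ((PySem.Dict.contains_iff_mem_keys _ _).2 h)

lemma pv_inner_getD (key : Int → String) (i : Int) (w : Int → Int) (l : List Int) :
    ∀ (ds : PySem.Dict String Int) (k : String),
    (l.foldl (fun ds j =>
        (ds.insert (key i) (ds.getD (key i) 0 + w j)).insert (key j)
          ((ds.insert (key i) (ds.getD (key i) 0 + w j)).getD (key j) 0 + w j)) ds).getD k 0
      = ds.getD k 0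
        + (l.map (fun j => (if k = key i then w j else 0) + (if k = key j then w j else 0))).sum := by
  induction l with
  | nil => intro ds k; simp
  | cons x xs ih =>
      intro ds k
      simp only [List.foldl_cons, List.map_cons, List.sum_cons]
      rw [ih, pv_bump_getD, pv_bump_getD]
      ring

lemma pv_outer_getD (key : Int → String) (w : Int → Int → Int) (n : Int) (I : List Int) :
    ∀ (ds : PySem.Dict String Int) (k : String),
    (I.foldl (fun ds i => (PySem.List.pyRange (i + 1) n 1).foldl (fun ds j =>
        (ds.insert (key i) (ds.getD (key i) 0 + w i j)).insert (key j)
          ((ds.insert (key i) (ds.getD (key i) 0 + w i j)).getD (key j) 0 + w i j)) ds) ds).getD k 0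
      = ds.getD k 0
        + (I.map (fun i => ((PySem.List.pyRange (i + 1) n 1).map
            (fun j => (if k = key i then w i j else 0) + (if k = key j then w i j else 0))).sum)).sum := by
  induction I with
  | nil => intro ds k; simp
  | cons x xs ih =>
      intro ds k
      simp only [List.foldl_cons, List.map_cons, List.sum_cons]
      rw [ih, pv_inner_getD]
      ring

lemma pv_foldl_keys_eq {α : Type} (l : List α) (g : PySem.Dict String Int → α → PySem.Dict String Int)
    (K : List String) (hg : ∀ ds x, x ∈ l → ds.keys = K → (g ds x).keys = K) :
    ∀ ds, ds.keys = K → (l.foldl g ds).keys = K := by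
  induction l with
  | nil => intro ds h; exact h
  | cons x xs ih =>
      intro ds h
      exact ih (fun ds y hy hk => hg ds y (by simp [hy]) hk) _ (hg ds x (by simp) h)

lemma pv_init_items (l : List String) (hl : l.Nodup) :
    (l.foldl (fun (acc : PySem.Dict String Int) k => acc.insert k 0) PySem.Dict.empty).items
      = l.map (fun k => (k, (0 : Int))) := by
  rw [show (fun (acc : PySem.Dict String Int) (k : String) => acc.insert k 0)
        = (fun (acc : PySem.Dict String Int) (k : String) => acc.insert ((fun a => a) k) ((fun _ => (0:Int)) k)) from rfl]
  rw [PySem.Dict.items_foldl_insert_fresh l (fun a => a) (fun _ => (0:Int)) PySem.Dict.empty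
        (fun a _ => PySem.Dict.contains_empty a) (by simpa using hl)]
  rw [show (PySem.Dict.empty : PySem.Dict String Int).items = [] from rfl,
    List.nil_append]

lemma pv_init_keys (l : List String) (hl : l.Nodup) :
    (l.foldl (fun (acc : PySem.Dict String Int) k => acc.insert k 0) PySem.Dict.empty).keys = l := by
  show ((l.foldl (fun (acc : PySem.Dict String Int) k => acc.insert k 0) PySem.Dict.empty).items.map Prod.fst) = l
  rw [pv_init_items l hl, List.map_map]
  rw [show (Prod.fst ∘ fun (k : String) => (k, (0 : Int))) = id from rfl, List.map_id]

lemma pv_init_getD (l : List String) (hl : l.Nodup) (k : String) :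
    (l.foldl (fun (acc : PySem.Dict String Int) k => acc.insert k 0) PySem.Dict.empty).getD k 0 = 0 := by
  cases h : (l.foldl (fun (acc : PySem.Dict String Int) k => acc.insert k 0) PySem.Dict.empty).contains k with
  | false => exact PySem.Dict.getD_of_not_contains _ _ h
  | true =>
      have hk : k ∈ (l.foldl (fun (acc : PySem.Dict String Int) k => acc.insert k 0) PySem.Dict.empty).keys :=
        (PySem.Dict.contains_iff_mem_keys _ _).1 h
      rw [pv_init_keys l hl] at hk
      refine PySem.Dict.getD_of_mem_items _ ?_ ?_ 0
      · rw [pv_init_items l hl]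
        exact List.mem_map.2 ⟨k, hk, rfl⟩
      · rw [pv_init_keys l hl]
        exact hl

lemma pv_lookup (seq : List (String × List Int)) (hnd : (seq.map Prod.fst).Nodup)
    (m : Nat) (hm : m < seq.length) :
    (PySem.Dict.mk seq).getD ((seq.map Prod.fst).getD m "") [] = (seq.getD m ("", [])).2 := by
  have hm' : m < (seq.map Prod.fst).length := by simpa using hm
  rw [List.getD_eq_getElem _ _ hm', List.getD_eq_getElem _ _ hm, List.getElem_map]
  refine PySem.Dict.getD_of_mem_items _ ?_ hnd []
  show ((seq[m].1, seq[m].2) ∈ seq)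
  simp

lemma pv_key_eq (seq : List (String × List Int)) (hnd : (seq.map Prod.fst).Nodup)
    (a b : Nat) (ha : a < seq.length) (hb : b < seq.length) :
    ((seq.map Prod.fst).getD a "" = (seq.map Prod.fst).getD b "") ↔ a = b := by
  have ha' : a < (seq.map Prod.fst).length := by simpa using ha
  have hb' : b < (seq.map Prod.fst).length := by simpa using hb
  rw [List.getD_eq_getElem _ _ ha', List.getD_eq_getElem _ _ hb']
  exact hnd.getElem_inj_iff

lemma pvW_eq (seq : List (String × List Int)) (hnd : (seq.map Prod.fst).Nodup)
    (a b : Nat) (ha : a < seq.length) (hb : b < seq.length) :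
    pvW seq (a : Int) (b : Int) = pvS (seq.getD a ("", [])).2 (seq.getD b ("", [])).2 := by
  unfold pvW
  rw [PySem.List.pyGetD_natCast, PySem.List.pyGetD_natCast,
    pv_lookup seq hnd a ha, pv_lookup seq hnd b hb, pvDiff_eq_pvS]

-- the value A accumulates at entry t equals pvVal seq t
lemma pv_A_value (seq : List (String × List Int)) (hnd : (seq.map Prod.fst).Nodup)
    (t : Nat) (ht : t < seq.length) :
    ((PySem.List.pyRange 0 (seq.length : Int) 1).map (fun i =>
        ((PySem.List.pyRange (i + 1) (seq.length : Int) 1).map (fun j =>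
          (if (seq.map Prod.fst).getD t "" = PySem.List.pyGetD (seq.map Prod.fst) i "" then pvW seq i j else 0)
          + (if (seq.map Prod.fst).getD t "" = PySem.List.pyGetD (seq.map Prod.fst) j "" then pvW seq i j else 0))).sum)).sum
      = pvVal seq t := by
  rw [pv_sum_map_pyRange_zero]
  -- step 1: reduce to a guarded double sum over range seq.length
  have hstep : ∀ i ∈ Finset.range seq.length,
      ((PySem.List.pyRange ((i : Int) + 1) (seq.length : Int) 1).map (fun j =>
          (if (seq.map Prod.fst).getD t "" = PySem.List.pyGetD (seq.map Prod.fst) ((i : Nat) : Int) "" then pvW seq ((i : Nat) : Int) j else 0)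
          + (if (seq.map Prod.fst).getD t "" = PySem.List.pyGetD (seq.map Prod.fst) j "" then pvW seq ((i : Nat) : Int) j else 0))).sum
      = ∑ j ∈ Finset.range seq.length, (if i < j then
          ((if t = i then pvS (seq.getD i ("", [])).2 (seq.getD j ("", [])).2 else 0)
           + (if t = j then pvS (seq.getD i ("", [])).2 (seq.getD j ("", [])).2 else 0)) else 0) := by
    intro i hi
    have hi' : i < seq.length := Finset.mem_range.1 hi
    rw [pv_sum_map_pyRange_succ]
    apply Finset.sum_congr rfl
    intro j hj
    have hj' : j < seq.length := Finset.mem_range.1 hj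
    by_cases hij : i < j
    · rw [if_pos hij, if_pos hij]
      rw [PySem.List.pyGetD_natCast, PySem.List.pyGetD_natCast, pvW_eq seq hnd i j hi' hj']
      rw [if_congr (pv_key_eq seq hnd t i ht hi') rfl rfl,
        if_congr (pv_key_eq seq hnd t j ht hj') rfl rfl]
    · rw [if_neg hij, if_neg hij]
  rw [Finset.sum_congr rfl hstep]
  -- step 2: split the two contributions
  have hsplit : ∀ i ∈ Finset.range seq.length, ∀ j ∈ Finset.range seq.length,
      (if i < j then
          ((if t = i then pvS (seq.getD i ("", [])).2 (seq.getD j ("", [])).2 else 0)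
           + (if t = j then pvS (seq.getD i ("", [])).2 (seq.getD j ("", [])).2 else 0)) else 0)
      = (if t = i ∧ i < j then pvS (seq.getD i ("", [])).2 (seq.getD j ("", [])).2 else 0)
        + (if t = j ∧ i < j then pvS (seq.getD i ("", [])).2 (seq.getD j ("", [])).2 else 0) := by
    intro i _ j _
    by_cases h1 : i < j <;> by_cases h2 : t = i <;> by_cases h3 : t = j <;>
      simp [h1, h2, h3]
  calc (∑ i ∈ Finset.range seq.length, ∑ j ∈ Finset.range seq.length, (if i < j then
          ((if t = i then pvS (seq.getD i ("", [])).2 (seq.getD j ("", [])).2 else 0)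
           + (if t = j then pvS (seq.getD i ("", [])).2 (seq.getD j ("", [])).2 else 0)) else 0))
      = (∑ i ∈ Finset.range seq.length, ∑ j ∈ Finset.range seq.length,
          (if t = i ∧ i < j then pvS (seq.getD i ("", [])).2 (seq.getD j ("", [])).2 else 0))
        + (∑ i ∈ Finset.range seq.length, ∑ j ∈ Finset.range seq.length,
          (if t = j ∧ i < j then pvS (seq.getD i ("", [])).2 (seq.getD j ("", [])).2 else 0)) := by
        rw [← Finset.sum_add_distrib]
        apply Finset.sum_congr rfl
        intro i hi
        rw [← Finset.sum_add_distrib]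
        exact Finset.sum_congr rfl (fun j hj => hsplit i hi j hj)
    _ = (∑ j ∈ Finset.range seq.length, if t < j then pvS (seq.getD t ("", [])).2 (seq.getD j ("", [])).2 else 0)
        + (∑ i ∈ Finset.range seq.length, if i < t then pvS (seq.getD i ("", [])).2 (seq.getD t ("", [])).2 else 0) := by
        congr 1
        · have h1 : ∀ i ∈ Finset.range seq.length,
              (∑ j ∈ Finset.range seq.length, if t = i ∧ i < j then pvS (seq.getD i ("", [])).2 (seq.getD j ("", [])).2 else 0)
              = if t = i then (∑ j ∈ Finset.range seq.length, if i < j then pvS (seq.getD i ("", [])).2 (seq.getD j ("", [])).2 else 0) else 0 := by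
            intro i _
            by_cases h : t = i
            · simp [h]
            · simp [h]
          rw [Finset.sum_congr rfl h1, Finset.sum_ite_eq]
          simp [Finset.mem_range.2 ht]
        · rw [Finset.sum_comm]
          have h2 : ∀ j ∈ Finset.range seq.length,
              (∑ i ∈ Finset.range seq.length, if t = j ∧ i < j then pvS (seq.getD i ("", [])).2 (seq.getD j ("", [])).2 else 0)
              = if t = j then (∑ i ∈ Finset.range seq.length, if i < j then pvS (seq.getD i ("", [])).2 (seq.getD j ("", [])).2 else 0) else 0 := by
            intro j _
            by_cases h : t = j
            · simp [h]
            · simp [h]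
          rw [Finset.sum_congr rfl h2, Finset.sum_ite_eq]
          simp [Finset.mem_range.2 ht]
    _ = pvVal seq t := by
        rw [← Finset.sum_add_distrib]
        unfold pvVal
        apply Finset.sum_congr rfl
        intro j _
        by_cases h1 : t < j
        · have h2 : ¬ j < t := by omega
          simp [h1, h2]
        · by_cases h2 : j < t
          · rw [if_neg h1, if_pos h2, zero_add]
            exact pvS_comm _ _
          · have h3 : j = t := by omega
            subst h3
            simp [pvS_self]

-- A's whole result, in the zeta-expanded shape of the port
lemma pv_final_items (seq : List (String × List Int)) (hnd : (seq.map Prod.fst).Nodup) :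
    ((PySem.List.pyRange 0 ((seq.map Prod.fst).length : Int) 1).foldl (fun ds i =>
      (PySem.List.pyRange (i + 1) ((seq.map Prod.fst).length : Int) 1).foldl (fun ds j =>
        (ds.insert (PySem.List.pyGetD (seq.map Prod.fst) i "")
            (ds.getD (PySem.List.pyGetD (seq.map Prod.fst) i "") 0 + pvW seq i j)).insert
          (PySem.List.pyGetD (seq.map Prod.fst) j "")
          ((ds.insert (PySem.List.pyGetD (seq.map Prod.fst) i "")
            (ds.getD (PySem.List.pyGetD (seq.map Prod.fst) i "") 0 + pvW seq i j)).getD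
              (PySem.List.pyGetD (seq.map Prod.fst) j "") 0 + pvW seq i j)) ds)
      ((seq.map Prod.fst).foldl (fun (acc : PySem.Dict String Int) k => acc.insert k 0) PySem.Dict.empty)).items
    = (List.range seq.length).map (fun t => ((seq.getD t ("", [])).1, pvVal seq t)) := by
  have hmem : ∀ (m : Int), 0 ≤ m → m < ((seq.map Prod.fst).length : Int) →
      PySem.List.pyGetD (seq.map Prod.fst) m "" ∈ seq.map Prod.fst := by
    intro m h1 h2
    refine PySem.List.pyGetD_mem _ _ ?_
    simp only [PySem.Raise.InRange]
    omega
  have hK : ((PySem.List.pyRange 0 ((seq.map Prod.fst).length : Int) 1).foldl (fun ds i =>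
      (PySem.List.pyRange (i + 1) ((seq.map Prod.fst).length : Int) 1).foldl (fun ds j =>
        (ds.insert (PySem.List.pyGetD (seq.map Prod.fst) i "")
            (ds.getD (PySem.List.pyGetD (seq.map Prod.fst) i "") 0 + pvW seq i j)).insert
          (PySem.List.pyGetD (seq.map Prod.fst) j "")
          ((ds.insert (PySem.List.pyGetD (seq.map Prod.fst) i "")
            (ds.getD (PySem.List.pyGetD (seq.map Prod.fst) i "") 0 + pvW seq i j)).getD
              (PySem.List.pyGetD (seq.map Prod.fst) j "") 0 + pvW seq i j)) ds)
      ((seq.map Prod.fst).foldl (fun (acc : PySem.Dict String Int) k => acc.insert k 0) PySem.Dict.empty)).keys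
      = seq.map Prod.fst := by
    refine pv_foldl_keys_eq _ _ _ ?_ _ (pv_init_keys _ hnd)
    intro ds i hi hk
    have hi' : 0 ≤ i ∧ i < ((seq.map Prod.fst).length : Int) := by
      simpa [PySem.List.mem_pyRange_one] using hi
    refine pv_foldl_keys_eq _ _ _ ?_ ds hk
    intro ds2 j hj hk2
    have hj' : i + 1 ≤ j ∧ j < ((seq.map Prod.fst).length : Int) := by
      simpa [PySem.List.mem_pyRange_one] using hj
    have hki : PySem.List.pyGetD (seq.map Prod.fst) i "" ∈ seq.map Prod.fst :=
      hmem i hi'.1 hi'.2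
    have hkj : PySem.List.pyGetD (seq.map Prod.fst) j "" ∈ seq.map Prod.fst :=
      hmem j (by omega) hj'.2
    have e1 : ((ds2.insert (PySem.List.pyGetD (seq.map Prod.fst) i "")
        (ds2.getD (PySem.List.pyGetD (seq.map Prod.fst) i "") 0 + pvW seq i j))).keys
        = seq.map Prod.fst := by
      rw [pv_bump_keys _ _ _ (by rw [hk2]; exact hki)]
      exact hk2
    rw [pv_bump_keys _ _ _ (by rw [e1]; exact hkj), e1]
  rw [PySem.Dict.items_eq_map_keys _ (by rw [hK]; exact hnd) 0, hK]
  rw [pv_map_eq_range_map (seq.map Prod.fst) _ ""]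
  rw [show (seq.map Prod.fst).length = seq.length from by simp]
  apply List.map_congr_left
  intro t htmem
  have ht : t < seq.length := List.mem_range.1 htmem
  have ht' : t < (seq.map Prod.fst).length := by simpa using ht
  refine Prod.ext ?_ ?_
  · show (seq.map Prod.fst).getD t "" = (seq.getD t ("", [])).1
    rw [List.getD_eq_getElem _ _ ht', List.getD_eq_getElem _ _ ht, List.getElem_map]
  · show (_ : PySem.Dict String Int).getD ((seq.map Prod.fst).getD t "") 0 = pvVal seq t
    rw [pv_outer_getD (fun i => PySem.List.pyGetD (seq.map Prod.fst) i "") (pvW seq)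
      (seq.length : Int) (PySem.List.pyRange 0 (seq.length : Int) 1)]
    rw [pv_init_getD _ hnd, zero_add]
    exact pv_A_value seq hnd t ht

lemma portA_eq (seq : List (String × List Int)) (hnd : (seq.map Prod.fst).Nodup) :
    calculate_pairwise_differences seq
      = (List.range seq.length).map (fun t => ((seq.getD t ("", [])).1, pvVal seq t)) := by
  have h := pv_final_items seq hnd
  unfold calculate_pairwise_differences
  exact h

-- ===== B-side lemmas =====
lemma pv_counts_getD (cells : List (Int × Int)) (c : Int × Int) :
    (cells.foldl (fun d c => d.insert c (d.getD c 0 + 1)) PySem.Dict.empty).getD c 0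
      = (cells.count c : Int) := by
  rw [PySem.Dict.getD_foldl_insert_add_one]
  simp

lemma pv_sizes_getD (cells : List (Int × Int)) (p : Int) :
    (cells.foldl (fun d c => d.insert c.1 (d.getD c.1 0 + 1)) PySem.Dict.empty).getD p 0
      = ((cells.map Prod.fst).count p : Int) := by
  rw [show cells.foldl (fun d c => d.insert c.1 (d.getD c.1 0 + 1)) (PySem.Dict.empty : PySem.Dict Int Int)
        = (cells.map Prod.fst).foldl (fun d x => d.insert x (d.getD x 0 + 1)) PySem.Dict.empty from
      (List.foldl_map (f := Prod.fst)
        (g := fun (d : PySem.Dict Int Int) (x : Int) => d.insert x (d.getD x 0 + 1))).symm]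
  rw [PySem.Dict.getD_foldl_insert_add_one]
  simp

lemma pv_count_flatMap {α β : Type} [BEq β] (l : List α) (f : α → List β) (c : β) :
    (l.flatMap f).count c = (l.map (fun x => (f x).count c)).sum := by
  induction l with
  | nil => simp
  | cons x xs ih => simp [List.flatMap_cons, List.count_append, ih]

lemma pv_enum_count (w : List Int) (p : Nat) (x : Int) :
    (PySem.List.enumerate w 0).count ((p : Int), x)
      = if p < w.length ∧ w.getD p 0 = x then 1 else 0 := by
  rw [PySem.List.enumerate_eq_map_pyRange w 0, PySem.List.len_eq]
  have hnd : ((PySem.List.pyRange 0 (w.length : Int)).map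
      (fun j => (j, PySem.List.pyGetD w j 0))).Nodup := by
    apply List.Nodup.map
    · intro a b hab
      exact congrArg Prod.fst hab
    · exact PySem.List.nodup_pyRange_one _ _
  by_cases h : p < w.length ∧ w.getD p 0 = x
  · rw [if_pos h]
    apply List.count_eq_one_of_mem hnd
    refine List.mem_map.2 ⟨(p : Int), ?_, ?_⟩
    · rw [PySem.List.mem_pyRange_one]
      obtain ⟨h1, _⟩ := h
      constructor <;> omega
    · rw [PySem.List.pyGetD_natCast, h.2]
  · rw [if_neg h]
    apply List.count_eq_zero_of_not_mem
    intro hm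
    obtain ⟨j, hj, hje⟩ := List.mem_map.1 hm
    obtain ⟨hj1, hj2⟩ := PySem.List.mem_pyRange_one.1 hj
    have hjp : j = (p : Int) := congrArg Prod.fst hje
    subst hjp
    apply h
    constructor
    · omega
    · have := congrArg Prod.snd hje
      simpa [PySem.List.pyGetD_natCast] using this

lemma pv_enum_fst_count (w : List Int) (p : Nat) :
    ((PySem.List.enumerate w 0).map Prod.fst).count ((p : Nat) : Int)
      = if p < w.length then 1 else 0 := by
  rw [PySem.List.enumerate_eq_map_pyRange w 0, PySem.List.len_eq, List.map_map]
  rw [show (Prod.fst ∘ fun (j : Int) => (j, PySem.List.pyGetD w j 0)) = id from rfl, List.map_id]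
  by_cases h : p < w.length
  · rw [if_pos h]
    apply List.count_eq_one_of_mem (PySem.List.nodup_pyRange_one _ _)
    rw [PySem.List.mem_pyRange_one]
    constructor <;> omega
  · rw [if_neg h]
    apply List.count_eq_zero_of_not_mem
    intro hm
    obtain ⟨_, h2⟩ := PySem.List.mem_pyRange_one.1 hm
    omega

lemma pv_ind_sub (c1 c2 : Prop) [Decidable c1] [Decidable c2] :
    (((if c1 then (1 : Nat) else 0) : Nat) : Int) - (((if c1 ∧ c2 then (1 : Nat) else 0) : Nat) : Int)
      = if c1 ∧ ¬ c2 then (1 : Int) else 0 := by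
  by_cases h1 : c1 <;> by_cases h2 : c2 <;> simp [h1, h2]

lemma pv_cell_value (seq : List (String × List Int)) (p : Nat) (x : Int) :
    (((seq.flatMap (fun kv => PySem.List.enumerate kv.2 0)).map Prod.fst).count ((p : Nat) : Int) : Int)
      - ((seq.flatMap (fun kv => PySem.List.enumerate kv.2 0)).count (((p : Nat) : Int), x) : Int)
      = ∑ j ∈ Finset.range seq.length,
          (if p < (seq.getD j ("", [])).2.length ∧ ¬ ((seq.getD j ("", [])).2.getD p 0 = x) then (1 : Int) else 0) := by
  rw [List.map_flatMap]
  rw [pv_count_flatMap, pv_count_flatMap]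
  simp only [pv_enum_fst_count, pv_enum_count]
  rw [pv_sum_map_eq_sum_range _ _ ("", []), pv_sum_map_eq_sum_range _ _ ("", [])]
  rw [Nat.cast_sum, Nat.cast_sum, ← Finset.sum_sub_distrib]
  apply Finset.sum_congr rfl
  intro j _
  exact pv_ind_sub _ _

-- B's whole result, in the zeta-expanded shape of the port
lemma pv_B_items (seq : List (String × List Int)) :
    seq.map (fun kv => (kv.1, ((PySem.List.enumerate kv.2 0).map (fun c =>
      ((seq.flatMap (fun kv => PySem.List.enumerate kv.2 0)).foldl
          (fun d c => d.insert c.1 (d.getD c.1 0 + 1)) PySem.Dict.empty).getD c.1 0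
      - ((seq.flatMap (fun kv => PySem.List.enumerate kv.2 0)).foldl
          (fun d c => d.insert c (d.getD c 0 + 1)) PySem.Dict.empty).getD c 0)).sum))
    = (List.range seq.length).map (fun t => ((seq.getD t ("", [])).1, pvVal seq t)) := by
  rw [pv_map_eq_range_map seq _ ("", [])]
  apply List.map_congr_left
  intro t htmem
  have ht : t < seq.length := List.mem_range.1 htmem
  refine Prod.ext rfl ?_
  show ((PySem.List.enumerate (seq.getD t ("", [])).2 0).map _).sum = pvVal seq t
  simp only [pv_sizes_getD, pv_counts_getD]
  rw [PySem.List.enumerate_eq_map_pyRange _ (0 : Int), PySem.List.len_eq, List.map_map]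
  rw [pv_sum_map_pyRange_zero]
  have hcell : ∀ q ∈ Finset.range (seq.getD t ("", [])).2.length,
      ((Function.comp (fun c : Int × Int =>
          (((seq.flatMap (fun kv => PySem.List.enumerate kv.2 0)).map Prod.fst).count c.1 : Int)
          - ((seq.flatMap (fun kv => PySem.List.enumerate kv.2 0)).count c : Int))
        (fun j : Int => (j, PySem.List.pyGetD (seq.getD t ("", [])).2 j 0))) ((q : Nat) : Int))
      = ∑ j ∈ Finset.range seq.length,
          (if q < (seq.getD j ("", [])).2.length ∧
              ¬ ((seq.getD j ("", [])).2.getD q 0 = (seq.getD t ("", [])).2.getD q 0) then (1 : Int) else 0) := by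
    intro q _
    simp only [Function.comp]
    rw [PySem.List.pyGetD_natCast]
    exact pv_cell_value seq q ((seq.getD t ("", [])).2.getD q 0)
  rw [Finset.sum_congr rfl hcell, Finset.sum_comm]
  unfold pvVal pvS
  apply Finset.sum_congr rfl
  intro j _
  apply Finset.sum_congr rfl
  intro q _
  congr 1
  rw [eq_iff_iff]
  constructor
  · rintro ⟨h1, h2⟩
    exact ⟨h1, fun e => h2 e.symm⟩
  · rintro ⟨h1, h2⟩
    exact ⟨h1, fun e => h2 e.symm⟩

lemma portB_eq (seq : List (String × List Int)) :
    calculate_pairwise_differences_alt seq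
      = (List.range seq.length).map (fun t => ((seq.getD t ("", [])).1, pvVal seq t)) := by
  have h := pv_B_items seq
  unfold calculate_pairwise_differences_alt
  exact h

-- ===== VERDICT (by name: the statement is the Claim_ definition above) =====
theorem calculate_pairwise_differences_spec : Claim_equal_calculate_pairwise_differences := by
  intro seq _ hpre
  unfold Spec_calculate_pairwise_differences
  rw [portA_eq seq hpre, portB_eq seq]
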